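-- pv_equiv track=rewrite | github.com/DraC3003/text2csv_PS2 | Medical System/report_generator.py | _get_latest_test_results
-- ===== SOURCE A (Python) =====
-- def _get_latest_test_results(test_results):
--     """Get the latest result for each test type"""
--     latest_results = {}
--
--     for result in test_results:
--         test_name = result[2]
--         test_date = result[7]
--
--         if test_name not in latest_results or test_date > latest_results[test_name][5]:
--             latest_results[test_name] = (
--                 test_name,           # 0: test_name
--                 result[3],           # 1: test_value
--                 result[4],           # 2: normal_min
--                 result[5],           # 3: normal_max
--                 result[6],           # 4: unit
--                 test_date            # 5: test_date
--             )
--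
--     return list(latest_results.values())
-- ===== SOURCE B (Python) =====
-- def _get_latest_test_results(test_results):
--     """Get the latest result for each test type"""
--     groups = {}
--     for r in test_results:
--         groups.setdefault(r[2], []).append(r)
--     out = []
--     for name, rows in groups.items():
--         best = max(rows, key=lambda x: x[7])
--         out.append((name, best[3], best[4], best[5], best[6], best[7]))
--     return out
-- ===== Notes on version B (the rewrite author's own statement) =====
-- stated objective: alternative
-- what changed: B replaces A's single pass that keeps one running best record per test name in a dict with a two-phase grouping: first build name -> list of all records with setdefault/append, then pick each group's latest record with max(key=date) and project it.
import Mathlib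
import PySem

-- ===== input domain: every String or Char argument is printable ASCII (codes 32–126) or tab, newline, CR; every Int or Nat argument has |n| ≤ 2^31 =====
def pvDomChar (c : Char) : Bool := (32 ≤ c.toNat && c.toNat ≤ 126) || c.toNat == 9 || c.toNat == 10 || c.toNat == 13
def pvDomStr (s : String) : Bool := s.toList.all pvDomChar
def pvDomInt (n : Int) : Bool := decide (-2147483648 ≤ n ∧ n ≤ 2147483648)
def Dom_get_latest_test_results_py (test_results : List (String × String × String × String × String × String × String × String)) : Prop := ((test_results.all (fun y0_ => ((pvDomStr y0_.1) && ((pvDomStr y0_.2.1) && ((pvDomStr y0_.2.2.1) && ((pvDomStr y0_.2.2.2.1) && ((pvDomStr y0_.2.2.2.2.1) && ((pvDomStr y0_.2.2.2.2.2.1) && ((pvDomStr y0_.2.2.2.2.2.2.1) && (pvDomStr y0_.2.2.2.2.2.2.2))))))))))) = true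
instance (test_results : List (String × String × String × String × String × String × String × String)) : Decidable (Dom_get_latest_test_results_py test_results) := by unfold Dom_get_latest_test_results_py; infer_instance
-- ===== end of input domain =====

-- B builds a name -> all-records grouping first and then takes max(rows, key=date) per group,
-- instead of A's running one-best-record-per-name dict; alternative decomposition, same cost.

abbrev PvRec8 := String × String × String × String × String × String × String × String
abbrev PvRec6 := String × String × String × String × String × String

def pvName (r : PvRec8) : String := r.2.2.1
def pvDate (r : PvRec8) : String := r.2.2.2.2.2.2.2
def pvProj (r : PvRec8) : PvRec6 :=
  (r.2.2.1, r.2.2.2.1, r.2.2.2.2.1, r.2.2.2.2.2.1, r.2.2.2.2.2.2.1, r.2.2.2.2.2.2.2)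

-- ===== PORT A =====
def get_latest_test_results_py (test_results : List (String × String × String × String × String × String × String × String)) : List (String × String × String × String × String × String) :=
  (test_results.foldl (fun d r =>
      match d.get? (pvName r) with
      | none => d.insert (pvName r) (pvProj r)
      | some cur => if cur.2.2.2.2.2 < pvDate r then d.insert (pvName r) (pvProj r) else d)
    PySem.Dict.empty).values

-- ===== PORT B =====
def get_latest_test_results_py_alt (test_results : List (String × String × String × String × String × String × String × String)) : List (String × String × String × String × String × String) :=
  let groups := test_results.foldl (fun d r => d.modify (pvName r) [] (fun l => l ++ [r])) PySem.Dict.empty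
  groups.items.foldl (fun out p =>
      match PySem.List.max? p.2 pvDate with
      | some best => out ++ [(p.1, best.2.2.2.1, best.2.2.2.2.1, best.2.2.2.2.2.1, best.2.2.2.2.2.2.1, best.2.2.2.2.2.2.2)]
      | none => out)   -- unreachable: groups never holds an empty list (Python max would raise there)
    []

-- ===== PRECONDITION & SPEC =====
def Spec_get_latest_test_results_py (test_results : List (String × String × String × String × String × String × String × String)) (out : List (String × String × String × String × String × String)) : Prop := out = get_latest_test_results_py_alt test_results
instance (test_results : List (String × String × String × String × String × String × String × String)) (out : List (String × String × String × String × String × String)) : Decidable (Spec_get_latest_test_results_py test_results out) := by unfold Spec_get_latest_test_results_py; infer_instance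

-- ===== CLAIM (what is proved, stated in full; the proofs are below) =====
def Claim_equal_get_latest_test_results_py : Prop := ∀ (test_results : List (String × String × String × String × String × String × String × String)), Dom_get_latest_test_results_py test_results → Spec_get_latest_test_results_py test_results (get_latest_test_results_py test_results)

-- ===== LEMMAS AND PROOFS =====

-- the records of ts whose test name is n, in order
def pvFil (ts : List PvRec8) (n : String) : List PvRec8 := ts.filter (fun r => pvName r == n)

-- the projected latest record among pvFil ts n (default is never reached for n ∈ ts.map pvName)
def pvEntry (ts : List PvRec8) (n : String) : PvRec6 :=
  match PySem.List.max? (pvFil ts n) pvDate with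
  | some b => pvProj b
  | none => default

def pvClosedItems (ts : List PvRec8) : List (String × PvRec6) :=
  (PySem.Set.ofList (ts.map pvName)).map (fun n => (n, pvEntry ts n))

-- basic facts --------------------------------------------------------------

theorem pvFil_append (ts : List PvRec8) (r : PvRec8) (n : String) :
    pvFil (ts ++ [r]) n = pvFil ts n ++ (if pvName r == n then [r] else []) := by
  simp [pvFil, List.filter_append, List.filter_cons]

theorem pvMax_append_some {l : List PvRec8} {m : PvRec8} (r : PvRec8)
    (h : PySem.List.max? l pvDate = some m) :
    PySem.List.max? (l ++ [r]) pvDate =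
      if pvDate m < pvDate r then some r else some m := by
  rw [PySem.List.max?] at h
  simp only [PySem.List.max?, List.foldl_append, List.foldl_cons, List.foldl_nil, h]

theorem pvFil_ne_nil {ts : List PvRec8} {n : String} (h : n ∈ ts.map pvName) :
    pvFil ts n ≠ [] := by
  intro hnil
  obtain ⟨r, hr, he⟩ := List.mem_map.mp h
  have := List.filter_eq_nil_iff.mp hnil r hr
  simp [he] at this

theorem pvEntry_spec {ts : List PvRec8} {n : String} (h : n ∈ ts.map pvName) :
    ∃ b, PySem.List.max? (pvFil ts n) pvDate = some b ∧ pvEntry ts n = pvProj b := by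
  cases hm : PySem.List.max? (pvFil ts n) pvDate with
  | none => exact absurd ((PySem.List.max?_eq_none_iff _ _).mp hm) (pvFil_ne_nil h)
  | some b => exact ⟨b, rfl, by simp [pvEntry, hm]⟩

theorem pvNames_append (ts : List PvRec8) (r : PvRec8) :
    PySem.Set.ofList ((ts ++ [r]).map pvName) =
      PySem.Set.add (PySem.Set.ofList (ts.map pvName)) (pvName r) := by
  simp [PySem.Set.ofList, List.foldl_append]

-- A's fold, characterised -----------------------------------------------------

theorem pvFoldA_items (ts : List PvRec8) :
    (ts.foldl (fun d r =>
        match d.get? (pvName r) with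
        | none => d.insert (pvName r) (pvProj r)
        | some cur => if cur.2.2.2.2.2 < pvDate r then d.insert (pvName r) (pvProj r) else d)
      PySem.Dict.empty).items = pvClosedItems ts := by
  induction ts using List.reverseRecOn with
  | nil => rfl
  | append_singleton ts r ih =>
    rw [List.foldl_append, List.foldl_cons, List.foldl_nil]
    set d := ts.foldl (fun d r =>
        match d.get? (pvName r) with
        | none => d.insert (pvName r) (pvProj r)
        | some cur => if cur.2.2.2.2.2 < pvDate r then d.insert (pvName r) (pvProj r) else d)
      PySem.Dict.empty with hd
    have hkeys : d.keys = PySem.Set.ofList (ts.map pvName) := by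
      simp [PySem.Dict.keys, ih, pvClosedItems, List.map_map, Function.comp_def]
    have hnd : d.keys.Nodup := by rw [hkeys]; exact PySem.Set.nodup_ofList _
    by_cases hmem : pvName r ∈ ts.map pvName
    · obtain ⟨b, hb, he⟩ := pvEntry_spec hmem
      have hmemS : pvName r ∈ PySem.Set.ofList (ts.map pvName) :=
        (PySem.Set.mem_ofList _ _).mpr hmem
      have hget : d.get? (pvName r) = some (pvEntry ts (pvName r)) := by
        refine PySem.Dict.get?_of_mem_items d ?_ hnd
        rw [ih]
        exact List.mem_map_of_mem hmemS
      have hcont : d.contains (pvName r) = true := by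
        rw [PySem.Dict.contains_eq_decide_mem_keys, hkeys]
        simpa using hmemS
      have hnames : PySem.Set.ofList ((ts ++ [r]).map pvName) = PySem.Set.ofList (ts.map pvName) := by
        rw [pvNames_append, PySem.Set.add]
        have : (PySem.Set.ofList (ts.map pvName)).contains (pvName r) = true := by
          simpa using hmemS
        rw [if_pos this]
      have hentry : ∀ n ∈ PySem.Set.ofList (ts.map pvName),
          pvEntry (ts ++ [r]) n =
            if n == pvName r then
              (if pvDate b < pvDate r then pvProj r else pvProj b)
            else pvEntry ts n := by
        intro n hn
        by_cases hne : n = pvName r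
        · subst hne
          rw [if_pos (by simp)]
          unfold pvEntry
          rw [pvFil_append, if_pos (by simp), pvMax_append_some r hb]
          by_cases hc : pvDate b < pvDate r <;> simp [hc]
        · rw [if_neg (by simp [hne])]
          have hfr : (pvName r == n) = false := by simp [Ne.symm hne]
          unfold pvEntry
          rw [pvFil_append, hfr]
          simp
      rw [hget, he]
      dsimp only
      have hdate : (pvProj b).2.2.2.2.2 = pvDate b := rfl
      rw [hdate]
      have hmap : ∀ v : PvRec6, (d.insert (pvName r) v).items =
          (PySem.Set.ofList (ts.map pvName)).map
            (fun n => if n == pvName r then (pvName r, v) else (n, pvEntry ts n)) := by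
        intro v
        rw [PySem.Dict.items_insert, if_pos hcont, ih]
        simp only [pvClosedItems, List.map_map]
        apply List.map_congr_left
        intro n hn
        by_cases hne : n = pvName r <;> simp [hne]
      rw [apply_ite (fun d : PySem.Dict String PvRec6 => d.items)]
      unfold pvClosedItems
      rw [hnames]
      split_ifs with hlt
      · rw [hmap]
        apply List.map_congr_left
        intro n hn
        rw [hentry n hn]
        by_cases hne : n = pvName r <;> simp [hne, hlt]
      · rw [ih]
        unfold pvClosedItems
        apply List.map_congr_left
        intro n hn
        rw [hentry n hn]
        by_cases hne : n = pvName r <;> simp [hne, hlt, he]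
    · have hnotS : pvName r ∉ PySem.Set.ofList (ts.map pvName) := fun h =>
        hmem ((PySem.Set.mem_ofList _ _).mp h)
      have hget : d.get? (pvName r) = none := by
        rw [PySem.Dict.get?_eq_none_iff_not_mem_keys, hkeys]; exact hnotS
      have hcont : d.contains (pvName r) = false := by
        rw [PySem.Dict.contains_eq_decide_mem_keys, hkeys]
        simpa using hnotS
      have hnames : PySem.Set.ofList ((ts ++ [r]).map pvName)
          = PySem.Set.ofList (ts.map pvName) ++ [pvName r] := by
        rw [pvNames_append, PySem.Set.add]
        have : (PySem.Set.ofList (ts.map pvName)).contains (pvName r) = false := by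
          simpa using hnotS
        rw [if_neg (by rw [this]; exact Bool.false_ne_true)]
      rw [hget]
      show (d.insert (pvName r) (pvProj r)).items = pvClosedItems (ts ++ [r])
      rw [PySem.Dict.items_insert, if_neg (by rw [hcont]; exact Bool.false_ne_true), ih]
      unfold pvClosedItems
      rw [hnames, List.map_append, List.map_singleton]
      congr 1
      · apply List.map_congr_left
        intro n hn
        have hne : n ≠ pvName r := fun h => hnotS (h ▸ hn)
        have : (pvName r == n) = false := by simp [Ne.symm hne]
        unfold pvEntry
        rw [pvFil_append, this, if_neg (by simp), List.append_nil]
      · have hfilnil : pvFil ts (pvName r) = [] := by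
          simp only [pvFil, List.filter_eq_nil_iff]
          intro a ha h
          exact hmem (List.mem_map.mpr ⟨a, ha, by simpa using h⟩)
        unfold pvEntry
        rw [pvFil_append, hfilnil, if_pos (by simp), List.nil_append]
        simp [PySem.List.max?, pvProj, pvName]

theorem pvA_eq (ts : List PvRec8) :
    get_latest_test_results_py ts = (pvClosedItems ts).map Prod.snd := by
  rw [← pvFoldA_items ts]
  rfl

-- B's grouping dict, characterised ------------------------------------------

theorem pvGroups_keys (ts : List PvRec8) :
    (ts.foldl (fun d r => d.modify (pvName r) [] (fun l => l ++ [r])) PySem.Dict.empty).keys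
      = PySem.Set.ofList (ts.map pvName) := by
  have h := PySem.Dict.keys_foldl_modify_key (ν := List PvRec8) ts pvName []
    (fun _ r l => l ++ [r]) PySem.Dict.empty
  simpa [PySem.Set.update, PySem.Set.ofList] using h

theorem pvGroups_nodup (ts : List PvRec8) :
    (ts.foldl (fun d r => d.modify (pvName r) [] (fun l => l ++ [r])) PySem.Dict.empty).keys.Nodup := by
  rw [pvGroups_keys]; exact PySem.Set.nodup_ofList _

theorem pvGroups_getD (ts : List PvRec8) (n : String) :
    (ts.foldl (fun d r => d.modify (pvName r) [] (fun l => l ++ [r])) PySem.Dict.empty).getD n []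
      = pvFil ts n := by
  have hmap : ts.foldl (fun d r => d.modify (pvName r) [] (fun l => l ++ [r])) PySem.Dict.empty
      = (ts.map (fun r => (pvName r, r))).foldl
          (fun d p => d.modify p.1 [] (fun l => l ++ [p.2])) PySem.Dict.empty := by
    rw [List.foldl_map]
  rw [hmap, PySem.Dict.getD_foldl_modify_append]
  simp [pvFil, List.filter_map, Function.comp_def]

theorem pv_flatMap_map_eq_map {α β γ : Type} (l : List α) (f : α → β) (g : β → List γ)
    (h : α → γ) (H : ∀ x ∈ l, g (f x) = [h x]) : (l.map f).flatMap g = l.map h := by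
  induction l with
  | nil => rfl
  | cons a t ih =>
    simp only [List.map_cons, List.flatMap_cons, H a (by simp)]
    rw [ih (fun x hx => H x (by simp [hx]))]
    rfl

theorem pvB_eq (ts : List PvRec8) :
    get_latest_test_results_py_alt ts = (pvClosedItems ts).map Prod.snd := by
  simp only [get_latest_test_results_py_alt]
  have hbody : (fun (out : List PvRec6) (p : String × List PvRec8) =>
        match PySem.List.max? p.2 pvDate with
        | some best => out ++ [(p.1, best.2.2.2.1, best.2.2.2.2.1, best.2.2.2.2.2.1, best.2.2.2.2.2.2.1, best.2.2.2.2.2.2.2)]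
        | none => out)
      = (fun out p => out ++ (match PySem.List.max? p.2 pvDate with
        | some best => [(p.1, best.2.2.2.1, best.2.2.2.2.1, best.2.2.2.2.2.1, best.2.2.2.2.2.2.1, best.2.2.2.2.2.2.2)]
        | none => [])) := by
    funext out p
    cases PySem.List.max? p.2 pvDate <;> simp
  rw [hbody, PySem.List.foldl_append_eq_flatMap, List.nil_append]
  rw [PySem.Dict.items_eq_map_keys _ (pvGroups_nodup ts) []]
  rw [pvGroups_keys]
  rw [pv_flatMap_map_eq_map (h := fun n => pvEntry ts n)]
  · simp [pvClosedItems, List.map_map, Function.comp_def]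
  · intro n hn
    have hmem : n ∈ ts.map pvName := (PySem.Set.mem_ofList _ _).mp hn
    obtain ⟨b, hb, he⟩ := pvEntry_spec hmem
    rw [pvGroups_getD, hb]
    have hbn : pvName b = n := by
      have hbmem := PySem.List.max?_mem hb
      have := List.mem_filter.mp hbmem
      simpa using this.2
    rw [he]
    unfold pvProj
    rw [show b.2.2.1 = n from hbn]

-- ===== VERDICT (by name: the statement is the Claim_ definition above) =====
theorem get_latest_test_results_py_spec : Claim_equal_get_latest_test_results_py := by
  intro ts _
  unfold Spec_get_latest_test_results_py
  rw [pvA_eq, pvB_eq]
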